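-- pv_equiv track=rewrite | github.com/keflavich/jwst_scripts | scripts/sickle_rgb_images.py | group_images_by_filter
-- ===== SOURCE A (Python) =====
-- def group_images_by_filter(image_dict):
--     """
--     Group images by their base filter name (e.g., f770w, f1130w, f1500w)
--     ignoring suffixes like 'b', 'c', etc.
--
--     Returns:
--         dict: {filter_name: [list_of_filenames]}
--     """
--     filter_groups = {}
--
--     for key, filename in image_dict.items():
--         # Extract base filter name by removing trailing letters
--         base_filter = key.rstrip('abcdefghijklmnopqrstuvwxyz')
--
--         if base_filter not in filter_groups:
--             filter_groups[base_filter] = []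
--         filter_groups[base_filter].append((key, filename))
--
--     return filter_groups
-- ===== SOURCE B (Python) =====
-- def group_images_by_filter(image_dict):
--     """
--     Group images by their base filter name (e.g., f770w, f1130w, f1500w)
--     ignoring suffixes like 'b', 'c', etc.
--
--     Returns:
--         dict: {filter_name: [list_of_filenames]}
--     """
--     # One pre-pass tags every item with its base filter; groups are then
--     # emitted per distinct base filter (first-occurrence order) by filtering.
--     tagged = [(k.rstrip('abcdefghijklmnopqrstuvwxyz'), (k, f))
--               for k, f in image_dict.items()]
--     order = list(dict.fromkeys(b for b, _ in tagged))
--     return {b: [kf for bb, kf in tagged if bb == b] for b in order}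
-- ===== Notes on version B (the rewrite author's own statement) =====
-- stated objective: alternative
-- what changed: Replaces the single-pass dict accumulation (create-list-if-missing, then append) with a tag-then-group strategy: one pass tags each item with its base filter, the distinct base filters are taken in first-occurrence order, and each group is produced by filtering the tagged list.
import Mathlib
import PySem

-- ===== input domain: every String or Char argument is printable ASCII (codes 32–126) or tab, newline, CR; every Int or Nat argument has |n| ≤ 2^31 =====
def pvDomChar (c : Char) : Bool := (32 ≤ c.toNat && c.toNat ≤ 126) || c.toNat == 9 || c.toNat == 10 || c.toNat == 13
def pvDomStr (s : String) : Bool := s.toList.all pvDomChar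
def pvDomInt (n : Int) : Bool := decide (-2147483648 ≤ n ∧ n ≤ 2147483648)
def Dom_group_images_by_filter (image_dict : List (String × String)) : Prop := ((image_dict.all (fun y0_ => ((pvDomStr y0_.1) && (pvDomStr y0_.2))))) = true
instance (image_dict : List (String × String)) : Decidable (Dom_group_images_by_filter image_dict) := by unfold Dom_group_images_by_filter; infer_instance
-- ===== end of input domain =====

-- B groups by the same base filter but via tag-then-group (distinct keys, then filter per key) instead of dict accumulation; same results, different decomposition.

-- ===== PORT A =====
-- key.rstrip('abcdefghijklmnopqrstuvwxyz'): drop trailing chars in 'a'..'z'.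
-- Hand port (PySem has no rstrip-with-chars); exact: rstrip(chars) removes exactly
-- the maximal trailing run of characters from the set, here the letters a..z.
def pyRstripLower (s : String) : String :=
  String.ofList ((s.toList.reverse.dropWhile (fun c => 'a' ≤ c && c ≤ 'z')).reverse)

def group_images_by_filter (image_dict : List (String × String)) : List (String × List (String × String)) :=
  -- filter_groups = {}; for key, filename: groups[base] = groups.get(base, []) + [(key, filename)]
  (image_dict.foldl
    (fun d p => d.modify (pyRstripLower p.1) [] (· ++ [p]))
    PySem.Dict.empty).items

-- ===== PORT B =====
def group_images_by_filter_alt (image_dict : List (String × String)) : List (String × List (String × String)) :=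
  let tagged := image_dict.map (fun p => (pyRstripLower p.1, p))
  let order := PySem.List.dedup (tagged.map (·.1))
  order.map (fun b => (b, (tagged.filter (fun t => t.1 == b)).map (·.2)))

-- ===== PRECONDITION & SPEC =====
def Spec_group_images_by_filter (image_dict : List (String × String)) (out : List (String × List (String × String))) : Prop := out = group_images_by_filter_alt image_dict
instance (image_dict : List (String × String)) (out : List (String × List (String × String))) : Decidable (Spec_group_images_by_filter image_dict out) := by unfold Spec_group_images_by_filter; infer_instance

-- ===== CLAIM (what is proved, stated in full; the proofs are below) =====
def Claim_equal_group_images_by_filter : Prop := ∀ (image_dict : List (String × String)), Dom_group_images_by_filter image_dict → Spec_group_images_by_filter image_dict (group_images_by_filter image_dict)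

-- ===== LEMMAS AND PROOFS =====

theorem group_images_by_filter_eq_alt (image_dict : List (String × String)) :
    group_images_by_filter image_dict = group_images_by_filter_alt image_dict := by
  unfold group_images_by_filter group_images_by_filter_alt
  set key : String × String → String := fun p => pyRstripLower p.1 with hkey
  set D := image_dict.foldl
    (fun d p => d.modify (key p) [] (· ++ [p])) PySem.Dict.empty with hD
  have hnd : D.keys.Nodup := by
    rw [hD]
    exact PySem.Dict.nodup_keys_foldl_modify_key image_dict key [] _ _
      PySem.Dict.nodup_keys_empty
  have hkeys : D.keys = PySem.List.dedup (image_dict.map key) := by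
    rw [hD, PySem.Dict.keys_foldl_modify_key, PySem.Dict.keys_empty,
      PySem.List.dedup_eq_ofList, ← PySem.Set.update_empty]
    rfl
  have hget : ∀ b : String,
      D.getD b [] = ((image_dict.map (fun p => (key p, p))).filter
        (fun t => t.1 == b)).map (·.2) := by
    intro b
    have := PySem.Dict.getD_foldl_modify_append
      (l := image_dict.map (fun p => (key p, p))) (d := PySem.Dict.empty) (c := b)
    rw [List.foldl_map] at this
    simpa [hD, PySem.Dict.getD_empty] using this
  rw [PySem.Dict.items_eq_map_keys D hnd [], hkeys]
  simp only [List.map_map]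
  apply List.map_congr_left
  intro b _
  simp only [hget b, hkey]

-- ===== VERDICT (by name: the statement is the Claim_ definition above) =====
theorem group_images_by_filter_spec : Claim_equal_group_images_by_filter := by
  intro image_dict _
  unfold Spec_group_images_by_filter
  exact group_images_by_filter_eq_alt image_dict
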